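-- pv_equiv track=rewrite | github.com/DanielLee271828/LSCCT | 2024_Task_A.py | min_time_to_finish
-- ===== SOURCE A (Python) =====
-- import heapq
--
-- def min_time_to_finish(N, track):
--     INF = float("inf")
--     min_time = [[INF] * (N + 1) for _ in range(N + 1)]
--     pq = [(0, 1, 0)]
--     min_time[1][0] = 0
--
--     while pq:
--         time, cell, boost = heapq.heappop(pq)
--
--         if cell == N:
--             return time
--
--         if min_time[cell][boost] < time:
--             continue
--
--         for next_cell in [cell - 1, cell + 1]:
--             if 1 <= next_cell <= N:
--                 move_time = 1 if boost > 0 else 2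
--                 new_boost = max(0, boost - 1)
--                 if time + move_time < min_time[next_cell][new_boost]:
--                     min_time[next_cell][new_boost] = time + move_time
--                     heapq.heappush(pq, (time + move_time, next_cell, new_boost))
--
--         if track[cell][0] == "J":
--             dest = track[cell][1]
--             if time + 1 < min_time[dest][0]:
--                 min_time[dest][0] = time + 1
--                 heapq.heappush(pq, (time + 1, dest, 0))
--
--         if track[cell][0] == "S":
--             boost_time = track[cell][1]
--             if time < min_time[cell][boost_time]:
--                 min_time[cell][boost_time] = time
--                 heapq.heappush(pq, (time, cell, boost_time))
--
--     return -1
-- ===== SOURCE B (Python) =====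
-- def min_time_to_finish(N, track):
--     # Queue-free dense Dijkstra: no priority queue at all.  Instead of pushing
--     # tentative entries into a heap and lazily skipping stale ones, keep only the
--     # dist table plus a visited table, and each round pick the (dist, cell, boost)
--     # lexicographic minimum among unvisited finite states by scanning the table,
--     # settle it, and relax its outgoing transitions in place.
--     INF = float("inf")
--     size = N + 1
--     dist = [[INF] * size for _ in range(size)]
--     dist[1][0] = 0
--     visited = [[False] * size for _ in range(size)]
--     while True:
--         cands = [(dist[c][b], c, b)
--                  for c in range(size) for b in range(size)
--                  if not visited[c][b] and dist[c][b] < INF]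
--         if not cands:
--             return -1
--         time, cell, boost = min(cands)
--         if cell == N:
--             return time
--         visited[cell][boost] = True
--         move_time = 1 if boost > 0 else 2
--         new_boost = max(0, boost - 1)
--         for next_cell in [cell - 1, cell + 1]:
--             if 1 <= next_cell <= N:
--                 if time + move_time < dist[next_cell][new_boost]:
--                     dist[next_cell][new_boost] = time + move_time
--         if track[cell][0] == "J":
--             dest = track[cell][1]
--             if time + 1 < dist[dest][0]:
--                 dist[dest][0] = time + 1
--         if track[cell][0] == "S":
--             boost_time = track[cell][1]
--             if time < dist[cell][boost_time]:
--                 dist[cell][boost_time] = time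
-- ===== Notes on version B (the rewrite author's own statement) =====
-- stated objective: alternative
-- what changed: The heap-based Dijkstra with lazy deletion of stale entries is replaced by a queue-free dense Dijkstra: no priority queue at all - only the dist table plus a visited table, each round scanning the whole state table for the lexicographically least unvisited finite (dist, cell, boost) state, settling it and relaxing its transitions in place.
-- outside the precondition, e.g. on min_time_to_finish(3, [('x', 0), ('J', 3)]): A returns 1, B returns 1; on min_time_to_finish(2, [('', 0), ('J', -1), ('', 0)]): A returns 2, B returns 1
import Mathlib
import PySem

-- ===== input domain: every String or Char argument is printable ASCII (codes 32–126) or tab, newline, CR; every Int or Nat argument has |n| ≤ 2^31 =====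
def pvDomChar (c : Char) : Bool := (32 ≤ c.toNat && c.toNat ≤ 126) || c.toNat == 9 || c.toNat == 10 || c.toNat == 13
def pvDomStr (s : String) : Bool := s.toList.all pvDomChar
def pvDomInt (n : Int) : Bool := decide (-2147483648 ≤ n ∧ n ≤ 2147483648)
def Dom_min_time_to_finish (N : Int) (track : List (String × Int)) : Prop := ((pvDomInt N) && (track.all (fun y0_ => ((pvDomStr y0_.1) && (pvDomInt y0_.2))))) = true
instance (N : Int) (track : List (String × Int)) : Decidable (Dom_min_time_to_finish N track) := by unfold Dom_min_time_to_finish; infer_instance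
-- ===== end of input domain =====

-- B replaces A's heap-based Dijkstra (heap with lazy deletion of stale entries) by a
-- queue-free dense Dijkstra: only a dist table and a visited table, selecting each round
-- the least unvisited finite (dist, cell, boost) state by a full table scan; equal return
-- value on every input admitted by Pre_.  The 2D arrays are modelled as total functions
-- over Int indices, exact for the in-range accesses Pre_ guarantees (Python's
-- negative-index wraparound and IndexError outside Pre_ are not modelled).

-- ===== PORT A =====
-- Python tuple comparison on (time, cell, boost): strict lexicographic <
def pvLexLt (x y : Int × Int × Int) : Bool :=
  x.1 < y.1 || (x.1 == y.1 && (x.2.1 < y.2.1 || (x.2.1 == y.2.1 && x.2.2 < y.2.2)))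

-- least element of x :: xs under pvLexLt (first extremal, as Python's min / heap order)
def pvListMin (x : Int × Int × Int) (xs : List (Int × Int × Int)) : Int × Int × Int :=
  xs.foldl (fun m e => if pvLexLt e m then e else m) x

-- "v < stored" where none encodes float('inf')
def pvLtVal (v : Int) (o : Option Int) : Bool :=
  match o with | some w => decide (v < w) | none => true

-- "stored < v" where none encodes float('inf')
def pvStale (o : Option Int) (v : Int) : Bool :=
  match o with | some w => decide (w < v) | none => false

-- min_time[c][b] = v (2D array as a function; exact for in-range indices)
def pvUpd (d : Int → Int → Option Int) (c b v : Int) : Int → Int → Option Int :=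
  fun c' b' => if c' = c ∧ b' = b then some v else d c' b'

-- track[cell]; exact when 0 ≤ c < len track (guaranteed by Pre_ at every access)
def pvTrackAt (track : List (String × Int)) (c : Int) : String × Int :=
  (PySem.List.pyGet? track c).getD ("", 0)

-- 'if val < min_time[c][b]: min_time[c][b] = val; heappush(pq, (val, c, b))' —
-- heapq is modelled as a plain list whose pop extracts the minimal tuple
def pvPushA (st : (Int → Int → Option Int) × List (Int × Int × Int)) (c b v : Int) :
    (Int → Int → Option Int) × List (Int × Int × Int) :=
  if pvLtVal v (st.1 c b) then (pvUpd st.1 c b v, st.2 ++ [(v, c, b)]) else st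

-- the relaxation block of A's loop body: two moves, then 'J', then 'S'
def pvRelaxA (N : Int) (track : List (String × Int)) (m : Int × Int × Int)
    (d : Int → Int → Option Int) (rest : List (Int × Int × Int)) :
    (Int → Int → Option Int) × List (Int × Int × Int) :=
  let mt : Int := if 0 < m.2.2 then 1 else 2
  let nb : Int := max 0 (m.2.2 - 1)
  let s1 := [m.2.1 - 1, m.2.1 + 1].foldl
    (fun s nc => if 1 ≤ nc ∧ nc ≤ N then pvPushA s nc nb (m.1 + mt) else s) (d, rest)
  let e := pvTrackAt track m.2.1
  let s2 := if e.1 = "J" then pvPushA s1 e.2 0 (m.1 + 1) else s1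
  if e.1 = "S" then pvPushA s2 m.2.1 e.2 m.1 else s2

def pvLoopA (N : Int) (track : List (String × Int)) :
    Nat → (Int → Int → Option Int) → List (Int × Int × Int) → Int
  | 0, _, _ => -1      -- fuel exhaustion (proved unreachable from the initial state)
  | fuel + 1, d, pq =>
    match pq with
    | [] => -1
    | x :: xs =>
      let m := pvListMin x xs           -- heappop: the least (time, cell, boost)
      let rest := (x :: xs).erase m
      if m.2.1 = N then m.1
      else if pvStale (d m.2.1 m.2.2) m.1 then pvLoopA N track fuel d rest
      else
        let s := pvRelaxA N track m d rest
        pvLoopA N track fuel s.1 s.2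

def min_time_to_finish (N : Int) (track : List (String × Int)) : Int :=
  pvLoopA N track (2 + 4 * ((N.toNat + 1) * (N.toNat + 1)))
    (pvUpd (fun _ _ => none) 1 0 0) [(0, 1, 0)]

-- ===== PORT B =====
-- relaxation that only updates the dist table (B keeps no queue)
def pvPushB (d : Int → Int → Option Int) (c b v : Int) : Int → Int → Option Int :=
  if pvLtVal v (d c b) then pvUpd d c b v else d

-- the same relaxation block, dist-table only
def pvRelaxB (N : Int) (track : List (String × Int)) (m : Int × Int × Int)
    (d : Int → Int → Option Int) : Int → Int → Option Int :=
  let mt : Int := if 0 < m.2.2 then 1 else 2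
  let nb : Int := max 0 (m.2.2 - 1)
  let d1 := [m.2.1 - 1, m.2.1 + 1].foldl
    (fun dd nc => if 1 ≤ nc ∧ nc ≤ N then pvPushB dd nc nb (m.1 + mt) else dd) d
  let e := pvTrackAt track m.2.1
  let d2 := if e.1 = "J" then pvPushB d1 e.2 0 (m.1 + 1) else d1
  if e.1 = "S" then pvPushB d2 m.2.1 e.2 m.1 else d2

-- the candidate comprehension: unvisited states with finite dist, as (dist, cell, boost)
def pvCands (N : Int) (vis : Int → Int → Bool) (d : Int → Int → Option Int) :
    List (Int × Int × Int) :=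
  (PySem.List.pyRange 0 (N + 1) 1).flatMap fun c =>
    (PySem.List.pyRange 0 (N + 1) 1).filterMap fun b =>
      if vis c b then none
      else match d c b with | some v => some (v, c, b) | none => none

def pvLoopB (N : Int) (track : List (String × Int)) :
    Nat → (Int → Int → Bool) → (Int → Int → Option Int) → Int
  | 0, _, _ => -1      -- fuel exhaustion (proved unreachable from the initial state)
  | fuel + 1, vis, d =>
    match pvCands N vis d with
    | [] => -1
    | x :: xs =>
      let m := pvListMin x xs          -- min(cands)
      if m.2.1 = N then m.1
      else
        let vis' := fun c' b' => if c' = m.2.1 ∧ b' = m.2.2 then true else vis c' b'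
        pvLoopB N track fuel vis' (pvRelaxB N track m d)

def min_time_to_finish_alt (N : Int) (track : List (String × Int)) : Int :=
  pvLoopB N track (1 + (N.toNat + 1) * (N.toNat + 1))
    (fun _ _ => false) (pvUpd (fun _ _ => none) 1 0 0)

-- ===== PRECONDITION & SPEC =====
-- Pre_ restricts to well-formed racetracks: at least N cells (when N ≥ 2) and, at every
-- reachable position 1..N-1, jump targets inside [1, N] and boost values inside [0, N].
-- Outside this A either raises IndexError (N ≤ 0, missing cells, too-large boost) or reads
-- rows through Python's negative-index wraparound; A can also return early through a jump
-- before ever touching a missing cell — such inputs are excluded here (see cites).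
def Pre_min_time_to_finish (N : Int) (track : List (String × Int)) : Prop :=
  1 ≤ N ∧ (2 ≤ N → N ≤ (track.length : Int)) ∧
  ∀ i : Fin track.length, 1 ≤ (i.val : Int) → (i.val : Int) < N →
    ((track[i].1 = "J" → 1 ≤ track[i].2 ∧ track[i].2 ≤ N) ∧
     (track[i].1 = "S" → 0 ≤ track[i].2 ∧ track[i].2 ≤ N))
instance (N : Int) (track : List (String × Int)) : Decidable (Pre_min_time_to_finish N track) := by
  unfold Pre_min_time_to_finish; infer_instance

def pvWitness_min_time_to_finish : Int × (List (String × Int)) :=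
  (3, [("x", 0), ("S", 2), ("J", 3), ("x", 0)])

def Spec_min_time_to_finish (N : Int) (track : List (String × Int)) (out : Int) : Prop := out = min_time_to_finish_alt N track
instance (N : Int) (track : List (String × Int)) (out : Int) : Decidable (Spec_min_time_to_finish N track out) := by unfold Spec_min_time_to_finish; infer_instance

-- ===== CLAIM (what is proved, stated in full; the proofs are below) =====
def Claim_equal_min_time_to_finish : Prop := ∀ (N : Int) (track : List (String × Int)), Dom_min_time_to_finish N track → Pre_min_time_to_finish N track → Spec_min_time_to_finish N track (min_time_to_finish N track)

-- ===== LEMMAS AND PROOFS =====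

-- ----- lexicographic order facts -----
theorem pvLexLt_iff (x y : Int × Int × Int) :
    pvLexLt x y = true ↔
      x.1 < y.1 ∨ (x.1 = y.1 ∧ (x.2.1 < y.2.1 ∨ (x.2.1 = y.2.1 ∧ x.2.2 < y.2.2))) := by
  simp [pvLexLt]

theorem pvLexLt_antisymm {x y : Int × Int × Int}
    (h1 : pvLexLt x y = false) (h2 : pvLexLt y x = false) : x = y := by
  obtain ⟨a, b, c⟩ := x; obtain ⟨a', b', c'⟩ := y
  simp only [pvLexLt, Bool.or_eq_false_iff, Bool.and_eq_false_iff, decide_eq_false_iff_not,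
    beq_eq_false_iff_ne, ne_eq] at h1 h2
  simp only [Prod.mk.injEq]
  omega

theorem pvLexLt_trans {x y z : Int × Int × Int}
    (h1 : pvLexLt x y = true) (h2 : pvLexLt y z = true) : pvLexLt x z = true := by
  obtain ⟨a, b, c⟩ := x; obtain ⟨a', b', c'⟩ := y; obtain ⟨a'', b'', c''⟩ := z
  simp only [pvLexLt_iff] at h1 h2 ⊢
  omega

theorem pvLexLt_false_trans {x y z : Int × Int × Int}
    (h1 : pvLexLt x y = false) (h2 : pvLexLt y z = false) : pvLexLt x z = false := by
  obtain ⟨a, b, c⟩ := x; obtain ⟨a', b', c'⟩ := y; obtain ⟨a'', b'', c''⟩ := z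
  simp only [pvLexLt, Bool.or_eq_false_iff, Bool.and_eq_false_iff, decide_eq_false_iff_not,
    beq_eq_false_iff_ne, ne_eq] at h1 h2 ⊢
  omega

theorem pvLexLt_fst_le {e m : Int × Int × Int} (h : pvLexLt e m = false) : m.1 ≤ e.1 := by
  obtain ⟨a, b, c⟩ := e; obtain ⟨a', b', c'⟩ := m
  simp only [pvLexLt, Bool.or_eq_false_iff, Bool.and_eq_false_iff, decide_eq_false_iff_not,
    beq_eq_false_iff_ne, ne_eq] at h
  omega

theorem pvListMin_mem (x : Int × Int × Int) (xs : List (Int × Int × Int)) :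
    pvListMin x xs ∈ x :: xs := by
  induction xs generalizing x with
  | nil => simp [pvListMin]
  | cons a l ih =>
    have h := ih (if pvLexLt a x then a else x)
    rw [List.mem_cons] at h
    simp only [pvListMin, List.foldl_cons] at *
    rcases h with h | h
    · by_cases hax : pvLexLt a x = true <;> simp only [hax, if_true, if_false, Bool.false_eq_true] at h ⊢ <;> rw [h] <;> simp
    · simp [h]

theorem pvListMin_min (x : Int × Int × Int) (xs : List (Int × Int × Int)) :
    ∀ e ∈ x :: xs, pvLexLt e (pvListMin x xs) = false := by
  induction xs generalizing x with
  | nil =>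
    intro e he
    rw [List.mem_singleton] at he
    subst he
    simp only [pvListMin, List.foldl_nil]
    obtain ⟨a, b, c⟩ := e
    simp [pvLexLt]
  | cons a l ih =>
    intro e he
    have hM := ih (if pvLexLt a x then a else x)
    have hMa : pvLexLt a (pvListMin x (a :: l)) = false := by
      by_cases hax : pvLexLt a x = true
      · have := hM a (by simp [hax])
        simpa [pvListMin, List.foldl_cons, hax] using this
      · have hx := hM (if pvLexLt a x then a else x) (by simp)
        have hxx : pvLexLt x (pvListMin x (a :: l)) = false := by
          simp only [Bool.not_eq_true] at hax
          simpa [pvListMin, List.foldl_cons, hax] using hx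
        have hax2 : pvLexLt a x = false := by simpa using hax
        exact pvLexLt_false_trans hax2 hxx
    have hMx : pvLexLt x (pvListMin x (a :: l)) = false := by
      by_cases hax : pvLexLt a x = true
      · by_cases hxm : pvLexLt x (pvListMin x (a :: l)) = true
        · exact absurd (pvLexLt_trans hax hxm) (by simp [hMa])
        · simpa using hxm
      · have hx := hM (if pvLexLt a x then a else x) (by simp)
        simp only [Bool.not_eq_true] at hax
        simpa [pvListMin, List.foldl_cons, hax] using hx
    rw [List.mem_cons, List.mem_cons] at he
    rcases he with he | he | he
    · rw [he]; exact hMx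
    · rw [he]; exact hMa
    · have := hM e (by simp [he])
      by_cases hax : pvLexLt a x = true <;>
        simpa [pvListMin, List.foldl_cons, hax] using this

-- ----- the simulation invariant -----
def pvInRange (N c b : Int) : Prop := 1 ≤ c ∧ c ≤ N ∧ 0 ≤ b ∧ b ≤ N

def pvInv (N : Int) (d : Int → Int → Option Int) (pq : List (Int × Int × Int))
    (S : List (Int × Int)) (T : Option Int) : Prop :=
  (∀ e ∈ pq, pvInRange N e.2.1 e.2.2 ∧ ∃ v, d e.2.1 e.2.2 = some v ∧ v ≤ e.1) ∧
  (∀ c b v, (c, b) ∉ S → d c b = some v → (v, c, b) ∈ pq) ∧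
  (∀ p ∈ S, ∃ v, d p.1 p.2 = some v ∧ (∀ t, T = some t → v ≤ t) ∧
      ∀ e ∈ pq, v ≤ e.1 ∧ (e.2 = p → v < e.1)) ∧
  (∀ c b, (pq.countP fun e => e.2.1 == c && e.2.2 == b && d c b == some e.1) ≤ 1) ∧
  S.Nodup ∧ (∀ p ∈ S, 1 ≤ p.1 ∧ p.1 ≤ N - 1 ∧ 0 ≤ p.2 ∧ p.2 ≤ N)

theorem pvInv_weaken {N d pq S T} (h : pvInv N d pq S (some T)) : pvInv N d pq S none := by
  obtain ⟨h1, h2, h3, h4, h5⟩ := h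
  refine ⟨h1, h2, ?_, h4, h5⟩
  intro p hp
  obtain ⟨v, hv, _, hrest⟩ := h3 p hp
  exact ⟨v, hv, by simp, hrest⟩

theorem pvPushA_fst (st : (Int → Int → Option Int) × List (Int × Int × Int)) (c b v : Int) :
    (pvPushA st c b v).1 = pvPushB st.1 c b v := by
  unfold pvPushA pvPushB
  split <;> rfl

theorem pvPushA_inv {N : Int} {st : (Int → Int → Option Int) × List (Int × Int × Int)}
    {S : List (Int × Int)} {T : Int} (c b v : Int)
    (h : pvInv N st.1 st.2 S (some T)) (hq : pvInRange N c b) (hv : T ≤ v) :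
    pvInv N (pvPushA st c b v).1 (pvPushA st c b v).2 S (some T) ∧
      (pvPushA st c b v).2.length ≤ st.2.length + 1 := by
  obtain ⟨d, pq⟩ := st
  by_cases hlt : pvLtVal v (d c b) = true
  case neg =>
    simp only [pvPushA, hlt, Bool.false_eq_true, if_false]
    exact ⟨h, by omega⟩
  case pos =>
  have hlt' : ∀ w, d c b = some w → v < w := by
    intro w hw
    simpa [pvLtVal, hw] using hlt
  simp only [pvPushA, hlt, if_true]
  obtain ⟨h1, h2, h3, h4, h5, h6⟩ := h
  refine ⟨⟨?_, ?_, ?_, ?_, h5, h6⟩, by simp⟩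
  · -- R1
    intro e he
    rcases List.mem_append.1 he with he | he
    · obtain ⟨hr, w, hw, hwle⟩ := h1 e he
      refine ⟨hr, ?_⟩
      by_cases hpe : e.2.1 = c ∧ e.2.2 = b
      · have hvw : v < w := hlt' w (by rw [← hpe.1, ← hpe.2]; exact hw)
        refine ⟨v, ?_, by omega⟩
        simp only [pvUpd]
        rw [if_pos hpe]
      · refine ⟨w, ?_, hwle⟩
        simp only [pvUpd]
        rw [if_neg hpe]
        exact hw
    · rw [List.mem_singleton] at he
      subst he
      refine ⟨hq, v, ?_, le_refl v⟩
      simp [pvUpd]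
  · -- R2
    intro c' b' w hnS hd'
    by_cases hpe : c' = c ∧ b' = b
    · have hw : w = v := by
        simp only [pvUpd] at hd'
        rw [if_pos hpe] at hd'
        exact (Option.some_inj.1 hd').symm
      subst hw
      rw [hpe.1, hpe.2]
      simp
    · have hd : d c' b' = some w := by
        simp only [pvUpd] at hd'
        rwa [if_neg hpe] at hd'
      exact List.mem_append_left _ (h2 c' b' w hnS hd)
  · -- R3
    intro p hp
    obtain ⟨w, hw, hwT, hrest⟩ := h3 p hp
    have hwT' : w ≤ T := hwT T rfl
    have hpne : ¬(p.1 = c ∧ p.2 = b) := by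
      rintro ⟨e1, e2⟩
      have hvw : v < w := hlt' w (by rw [← e1, ← e2]; exact hw)
      omega
    refine ⟨w, ?_, hwT, ?_⟩
    · simp only [pvUpd]
      rw [if_neg hpne]
      exact hw
    · intro e he
      rcases List.mem_append.1 he with he | he
      · exact hrest e he
      · rw [List.mem_singleton] at he
        subst he
        refine ⟨by omega, ?_⟩
        intro hep
        exact absurd ⟨congrArg Prod.fst hep.symm, congrArg Prod.snd hep.symm⟩ hpne
  · -- R4
    intro c' b'
    rw [List.countP_append]
    by_cases hpe : c' = c ∧ b' = b
    · obtain ⟨rfl, rfl⟩ := hpe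
      have hdd : pvUpd d c' b' v c' b' = some v := by simp [pvUpd]
      have hz : (List.countP (fun e => e.2.1 == c' && e.2.2 == b' && pvUpd d c' b' v c' b' == some e.1) pq) = 0 := by
        rw [List.countP_eq_zero]
        intro e he
        obtain ⟨_, w, hw, hwle⟩ := h1 e he
        simp only [hdd, Bool.and_eq_true, beq_iff_eq]
        rintro ⟨⟨hc1, hc2⟩, hc3⟩
        have hvw : v < w := hlt' w (by rw [← hc1, ← hc2]; exact hw)
        have hve : (v : Int) = e.1 := Option.some_inj.1 hc3
        omega
      rw [hz]
      simp [hdd]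
    · have hdd : pvUpd d c b v c' b' = d c' b' := by
        simp only [pvUpd]
        rw [if_neg hpe]
      have hone : (List.countP (fun e => e.2.1 == c' && e.2.2 == b' && pvUpd d c b v c' b' == some e.1) [(v, c, b)]) = 0 := by
        rw [List.countP_eq_zero]
        intro e he
        rw [List.mem_singleton] at he
        subst he
        simp only [Bool.and_eq_true, beq_iff_eq]
        rintro ⟨⟨hc1, hc2⟩, _⟩
        exact hpe ⟨hc1.symm, hc2.symm⟩
      rw [hone, hdd]
      simpa using h4 c' b'


-- a guarded push step (the condition does not read the state)
theorem pvGuardPush {N : Int} {st : (Int → Int → Option Int) × List (Int × Int × Int)}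
    {S : List (Int × Int)} {T : Int} (C : Prop) [Decidable C] (c b v : Int)
    (h : pvInv N st.1 st.2 S (some T)) (hq : C → pvInRange N c b) (hv : T ≤ v) :
    pvInv N (if C then pvPushA st c b v else st).1 (if C then pvPushA st c b v else st).2 S (some T) ∧
      (if C then pvPushA st c b v else st).2.length ≤ st.2.length + 1 ∧
      (if C then pvPushA st c b v else st).1 = (if C then pvPushB st.1 c b v else st.1) := by
  split
  · rename_i hC
    obtain ⟨h1, h2⟩ := pvPushA_inv c b v h (hq hC) hv
    exact ⟨h1, h2, pvPushA_fst st c b v⟩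
  · exact ⟨h, by omega, rfl⟩

-- the relaxation block preserves the invariant, grows the queue by ≤ 4 and computes
-- the same dist table as B's relaxation
theorem pvRelaxA_inv {N : Int} {track : List (String × Int)} {m : Int × Int × Int}
    {d : Int → Int → Option Int} {rest : List (Int × Int × Int)} {S : List (Int × Int)}
    (h : pvInv N d rest S (some m.1))
    (hc : 1 ≤ m.2.1) (hcN : m.2.1 ≤ N - 1) (_hb0 : 0 ≤ m.2.2) (hbN : m.2.2 ≤ N)
    (hTr : ((pvTrackAt track m.2.1).1 = "J" →
              1 ≤ (pvTrackAt track m.2.1).2 ∧ (pvTrackAt track m.2.1).2 ≤ N) ∧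
           ((pvTrackAt track m.2.1).1 = "S" →
              0 ≤ (pvTrackAt track m.2.1).2 ∧ (pvTrackAt track m.2.1).2 ≤ N)) :
    pvInv N (pvRelaxA N track m d rest).1 (pvRelaxA N track m d rest).2 S (some m.1) ∧
      (pvRelaxA N track m d rest).2.length ≤ rest.length + 4 ∧
      (pvRelaxA N track m d rest).1 = pvRelaxB N track m d := by
  have hN2 : 2 ≤ N := by omega
  simp only [pvRelaxA, pvRelaxB, List.foldl_cons, List.foldl_nil]
  have hmtpos : (0 : Int) < (if 0 < m.2.2 then 1 else 2) := by split <;> omega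
  have hnb0 : (0 : Int) ≤ max 0 (m.2.2 - 1) := le_max_left _ _
  have hnbN : max 0 (m.2.2 - 1) ≤ N := max_le (by omega) (by omega)
  obtain ⟨hI1, hL1, hF1⟩ :=
    pvGuardPush (st := (d, rest)) (C := 1 ≤ m.2.1 - 1 ∧ m.2.1 - 1 ≤ N)
      (m.2.1 - 1) (max 0 (m.2.2 - 1)) (m.1 + (if 0 < m.2.2 then 1 else 2)) h
      (fun hC => ⟨hC.1, hC.2, hnb0, hnbN⟩) (by omega)
  obtain ⟨hI2, hL2, hF2⟩ :=
    pvGuardPush (C := 1 ≤ m.2.1 + 1 ∧ m.2.1 + 1 ≤ N)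
      (m.2.1 + 1) (max 0 (m.2.2 - 1)) (m.1 + (if 0 < m.2.2 then 1 else 2)) hI1
      (fun hC => ⟨hC.1, hC.2, hnb0, hnbN⟩) (by omega)
  obtain ⟨hI3, hL3, hF3⟩ :=
    pvGuardPush (C := (pvTrackAt track m.2.1).1 = "J")
      (pvTrackAt track m.2.1).2 0 (m.1 + 1) hI2
      (fun hC => ⟨(hTr.1 hC).1, (hTr.1 hC).2, le_refl 0, by omega⟩) (by omega)
  obtain ⟨hI4, hL4, hF4⟩ :=
    pvGuardPush (C := (pvTrackAt track m.2.1).1 = "S")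
      m.2.1 (pvTrackAt track m.2.1).2 m.1 hI3
      (fun hC => ⟨hc, by omega, (hTr.2 hC).1, (hTr.2 hC).2⟩) (le_refl m.1)
  refine ⟨hI4, ?_, ?_⟩
  · have hdr : ((d, rest).2).length = rest.length := rfl
    omega
  · rw [hF4, hF3, hF2, hF1]

-- ----- facts about the popped minimum -----
theorem pvPop_val {N d x xs S} (h : pvInv N d (x :: xs) S none)
    (hS : (( pvListMin x xs).2.1, (pvListMin x xs).2.2) ∉ S) :
    d (pvListMin x xs).2.1 (pvListMin x xs).2.2 = some (pvListMin x xs).1 := by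
  obtain ⟨h1, h2, h3, h4, h5, h6⟩ := h
  obtain ⟨hr, w, hw, hwle⟩ := h1 _ (pvListMin_mem x xs)
  have hmm := h2 _ _ w hS hw
  have hlt := pvListMin_min x xs _ hmm
  have hge : (pvListMin x xs).1 ≤ w := by
    simp only [pvLexLt, Bool.or_eq_false_iff, Bool.and_eq_false_iff, decide_eq_false_iff_not,
      beq_eq_false_iff_ne, ne_eq] at hlt
    omega
  rw [hw]
  congr 1
  omega

theorem pvStale_inv {N d x xs S} (h : pvInv N d (x :: xs) S none)
    (hS : ((pvListMin x xs).2.1, (pvListMin x xs).2.2) ∈ S) :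
    (∃ v, d (pvListMin x xs).2.1 (pvListMin x xs).2.2 = some v ∧ v < (pvListMin x xs).1) ∧
      (pvListMin x xs).2.1 ≠ N ∧
      pvInv N d ((x :: xs).erase (pvListMin x xs)) S none := by
  obtain ⟨h1, h2, h3, h4, h5, h6⟩ := h
  have hmem := pvListMin_mem x xs
  obtain ⟨v, hv, _, hrest⟩ := h3 _ hS
  have hstrict : v < (pvListMin x xs).1 := (hrest _ hmem).2 rfl
  have hbnd := h6 _ hS
  refine ⟨⟨v, hv, hstrict⟩, by intro hc; rw [hc] at hbnd; omega, ?_, ?_, ?_, ?_, h5, h6⟩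
  · intro e he
    exact h1 e (List.mem_of_mem_erase he)
  · intro c b w hnS hd
    have hne : (w, c, b) ≠ pvListMin x xs := by
      intro hc
      apply hnS
      rw [show (c, b) = (pvListMin x xs).2 by rw [← hc]]
      exact hS
    exact (List.mem_erase_of_ne hne).2 (h2 c b w hnS hd)
  · intro p hp
    obtain ⟨w, hw, _, hr⟩ := h3 p hp
    exact ⟨w, hw, by simp, fun e he => hr e (List.mem_of_mem_erase he)⟩
  · intro c b
    exact le_trans (List.Sublist.countP_le List.erase_sublist) (h4 c b)

theorem pvSettle_inv {N d x xs S} (h : pvInv N d (x :: xs) S none)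
    (hS : ((pvListMin x xs).2.1, (pvListMin x xs).2.2) ∉ S)
    (hNe : (pvListMin x xs).2.1 ≠ N) :
    pvInv N d ((x :: xs).erase (pvListMin x xs))
      (((pvListMin x xs).2.1, (pvListMin x xs).2.2) :: S) (some (pvListMin x xs).1) := by
  have hdm := pvPop_val h hS
  obtain ⟨h1, h2, h3, h4, h5, h6⟩ := h
  have hmem := pvListMin_mem x xs
  have hmin := pvListMin_min x xs
  obtain ⟨hr, _⟩ := h1 _ hmem
  -- the tuple (pvListMin x xs) occurs at most once in the queue
  have hcnt : List.count (pvListMin x xs) (x :: xs) ≤ 1 := by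
    have hmono : List.count (pvListMin x xs) (x :: xs) ≤
        List.countP (fun e => e.2.1 == (pvListMin x xs).2.1 && e.2.2 == (pvListMin x xs).2.2 &&
          d (pvListMin x xs).2.1 (pvListMin x xs).2.2 == some e.1) (x :: xs) := by
      rw [List.count]
      apply List.countP_mono_left
      intro e _ he
      have : e = pvListMin x xs := by simpa using he
      subst this
      simp [hdm]
    exact le_trans hmono (h4 _ _)
  have hnotrest : pvListMin x xs ∉ (x :: xs).erase (pvListMin x xs) := by
    rw [← List.count_eq_zero]
    have : List.count (pvListMin x xs) ((x :: xs).erase (pvListMin x xs)) = List.count (pvListMin x xs) (x :: xs) - 1 := List.count_erase_self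
    omega
  refine ⟨?_, ?_, ?_, ?_, ?_, ?_⟩
  · intro e he
    exact h1 e (List.mem_of_mem_erase he)
  · intro c b w hnS hd
    rw [List.mem_cons] at hnS
    push Not at hnS
    have hne : (w, c, b) ≠ pvListMin x xs := by
      intro hc
      exact hnS.1 (by rw [show (c, b) = (pvListMin x xs).2 by rw [← hc]])
    exact (List.mem_erase_of_ne hne).2 (h2 c b w hnS.2 hd)
  · intro p hp
    rw [List.mem_cons] at hp
    rcases hp with hp | hp
    · subst hp
      refine ⟨(pvListMin x xs).1, hdm, by intro t ht; cases ht; omega, ?_⟩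
      intro e he
      have hein := List.mem_of_mem_erase he
      have hle := pvLexLt_fst_le (hmin e hein)
      refine ⟨hle, ?_⟩
      intro hep
      rcases lt_or_eq_of_le hle with hlt | heq
      · exact hlt
      · exfalso
        apply hnotrest
        have : e = pvListMin x xs := Prod.ext heq.symm hep
        rwa [this] at he
    · obtain ⟨w, hw, _, hrest⟩ := h3 p hp
      refine ⟨w, hw, ?_, ?_⟩
      · intro t ht
        have := (hrest _ hmem).1
        cases ht
        omega
      · intro e he
        exact hrest e (List.mem_of_mem_erase he)
  · intro c b
    exact le_trans (List.Sublist.countP_le List.erase_sublist) (h4 c b)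
  · exact List.nodup_cons.2 ⟨hS, h5⟩
  · intro p hp
    rw [List.mem_cons] at hp
    rcases hp with hp | hp
    · subst hp
      obtain ⟨hr1, hr2, hr3, hr4⟩ := hr
      refine ⟨hr1, by omega, hr3, hr4⟩
    · exact h6 p hp

-- ----- B's candidate list -----
theorem pvCands_mem {N vis d} (e : Int × Int × Int) :
    e ∈ pvCands N vis d ↔
      0 ≤ e.2.1 ∧ e.2.1 < N + 1 ∧ 0 ≤ e.2.2 ∧ e.2.2 < N + 1 ∧
        vis e.2.1 e.2.2 = false ∧ d e.2.1 e.2.2 = some e.1 := by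
  simp only [pvCands, List.mem_flatMap, List.mem_filterMap, PySem.List.mem_pyRange_one]
  constructor
  · rintro ⟨c, ⟨hc0, hcN⟩, b, ⟨hb0, hbN⟩, hmatch⟩
    cases hv : vis c b
    · rw [hv] at hmatch
      simp only [Bool.false_eq_true, if_false] at hmatch
      cases hd : d c b
      · rw [hd] at hmatch
        simp at hmatch
      · rename_i v
        rw [hd] at hmatch
        simp only [Option.some_inj] at hmatch
        subst hmatch
        exact ⟨hc0, hcN, hb0, hbN, hv, hd ▸ rfl⟩
    · rw [hv] at hmatch
      simp at hmatch
  · rintro ⟨h1, h2, h3, h4, h5, h6⟩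
    refine ⟨e.2.1, ⟨h1, h2⟩, e.2.2, ⟨h3, h4⟩, ?_⟩
    rw [h5, h6]
    simp

-- ----- cardinality of the settled set -----
theorem pvS_card {N : Int} {S : List (Int × Int)} (hnd : S.Nodup)
    (hb : ∀ p ∈ S, 1 ≤ p.1 ∧ p.1 ≤ N - 1 ∧ 0 ≤ p.2 ∧ p.2 ≤ N) :
    S.length ≤ (N.toNat + 1) * (N.toNat + 1) := by
  have hcard : S.length = S.toFinset.card := (List.toFinset_card_of_nodup hnd).symm
  have hsub : S.toFinset ⊆ Finset.Icc (1 : ℤ) N ×ˢ Finset.Icc (0 : ℤ) N := by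
    intro p hp
    rw [List.mem_toFinset] at hp
    have := hb p hp
    rw [Finset.mem_product, Finset.mem_Icc, Finset.mem_Icc]
    omega
  have hle := Finset.card_le_card hsub
  rw [Finset.card_product, Int.card_Icc, Int.card_Icc] at hle
  have h1 : (N + 1 - 1).toNat ≤ N.toNat + 1 := by omega
  have h2 : (N + 1 - 0).toNat ≤ N.toNat + 1 := by omega
  calc S.length ≤ (N + 1 - 1).toNat * (N + 1 - 0).toNat := hcard ▸ hle
    _ ≤ (N.toNat + 1) * (N.toNat + 1) := Nat.mul_le_mul h1 h2

-- one-step unfoldings of the two loops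
theorem pvLoopA_cons (N : Int) (track : List (String × Int)) (n : Nat)
    (d : Int → Int → Option Int) (x : Int × Int × Int) (xs : List (Int × Int × Int)) :
    pvLoopA N track (n + 1) d (x :: xs) =
      (if (pvListMin x xs).2.1 = N then (pvListMin x xs).1
       else if pvStale (d (pvListMin x xs).2.1 (pvListMin x xs).2.2) (pvListMin x xs).1 then
         pvLoopA N track n d ((x :: xs).erase (pvListMin x xs))
       else
         pvLoopA N track n
           (pvRelaxA N track (pvListMin x xs) d ((x :: xs).erase (pvListMin x xs))).1
           (pvRelaxA N track (pvListMin x xs) d ((x :: xs).erase (pvListMin x xs))).2) := rfl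

theorem pvLoopB_cons (N : Int) (track : List (String × Int)) (n : Nat)
    (vis : Int → Int → Bool) (d : Int → Int → Option Int)
    (y : Int × Int × Int) (ys : List (Int × Int × Int))
    (hc : pvCands N vis d = y :: ys) :
    pvLoopB N track (n + 1) vis d =
      (if (pvListMin y ys).2.1 = N then (pvListMin y ys).1
       else pvLoopB N track n
         (fun c' b' => if c' = (pvListMin y ys).2.1 ∧ b' = (pvListMin y ys).2.2 then true
                       else vis c' b')
         (pvRelaxB N track (pvListMin y ys) d)) := by
  show (match pvCands N vis d with
        | [] => (-1 : Int)
        | x :: xs =>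
          let m := pvListMin x xs
          if m.2.1 = N then m.1
          else
            let vis' := fun c' b' => if c' = m.2.1 ∧ b' = m.2.2 then true else vis c' b'
            pvLoopB N track n vis' (pvRelaxB N track m d)) = _
  rw [hc]

-- ----- the main simulation -----
theorem pvSim (N : Int) (track : List (String × Int)) (_hN : 1 ≤ N)
    (hTr : ∀ c : Int, 1 ≤ c → c ≤ N - 1 →
      ((pvTrackAt track c).1 = "J" →
          1 ≤ (pvTrackAt track c).2 ∧ (pvTrackAt track c).2 ≤ N) ∧
      ((pvTrackAt track c).1 = "S" →
          0 ≤ (pvTrackAt track c).2 ∧ (pvTrackAt track c).2 ≤ N)) :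
    ∀ (fA : Nat) (d : Int → Int → Option Int) (pq : List (Int × Int × Int))
      (S : List (Int × Int)) (vis : Int → Int → Bool) (fB : Nat),
      pvInv N d pq S none →
      (∀ c b, vis c b = decide ((c, b) ∈ S)) →
      pq.length + 4 * ((N.toNat + 1) * (N.toNat + 1) - S.length) < fA →
      (N.toNat + 1) * (N.toNat + 1) - S.length < fB →
      pvLoopA N track fA d pq = pvLoopB N track fB vis d := by
  intro fA
  induction fA with
  | zero =>
    intro d pq S vis fB hInv hVis hfA hfB
    omega
  | succ n ih =>
    intro d pq S vis fB hInv hVis hfA hfB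
    obtain ⟨fb, rfl⟩ : ∃ fb, fB = fb + 1 := ⟨fB - 1, by omega⟩
    cases pq with
    | nil =>
      have hcands : pvCands N vis d = [] := by
        rcases h : pvCands N vis d with _ | ⟨e, t⟩
        · rfl
        · exfalso
          have he : e ∈ pvCands N vis d := by rw [h]; exact List.mem_cons_self
          rw [pvCands_mem] at he
          have hnS : (e.2.1, e.2.2) ∉ S := by
            intro hs
            have hv := hVis e.2.1 e.2.2
            rw [he.2.2.2.2.1] at hv
            simp [hs] at hv
          have := hInv.2.1 e.2.1 e.2.2 e.1 hnS he.2.2.2.2.2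
          simp at this
      have hA : pvLoopA N track (n + 1) d [] = -1 := rfl
      have hB : pvLoopB N track (fb + 1) vis d = -1 := by
        show (match pvCands N vis d with
              | [] => (-1 : Int)
              | x :: xs =>
                let m := pvListMin x xs
                if m.2.1 = N then m.1
                else
                  let vis' := fun c' b' => if c' = m.2.1 ∧ b' = m.2.2 then true else vis c' b'
                  pvLoopB N track fb vis' (pvRelaxB N track m d)) = -1
        rw [hcands]
      rw [hA, hB]
    | cons x xs =>
      have hmem := pvListMin_mem x xs
      have hmin := pvListMin_min x xs
      obtain ⟨hr, w0, hw0, hw0le⟩ := hInv.1 _ hmem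
      by_cases hS : ((pvListMin x xs).2.1, (pvListMin x xs).2.2) ∈ S
      · -- stale pop: A skips, B unchanged
        obtain ⟨⟨v, hv, hvlt⟩, hne, hInv'⟩ := pvStale_inv hInv hS
        rw [pvLoopA_cons, if_neg hne, if_pos (by rw [hv]; simp [pvStale, hvlt])]
        apply ih _ _ S vis (fb + 1) hInv' hVis ?_ hfB
        have hlen := List.length_erase_of_mem hmem
        rw [hlen]
        have hx : (x :: xs).length = xs.length + 1 := rfl
        omega
      · -- settled pop: both loops process the same state
        have hdm := pvPop_val hInv hS
        have hmc : pvListMin x xs ∈ pvCands N vis d := by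
          rw [pvCands_mem]
          obtain ⟨ha, hbb, hcc, hdd⟩ := hr
          refine ⟨by omega, by omega, hcc, by omega, ?_, hdm⟩
          rw [hVis]
          simp [hS]
        rcases hcand : pvCands N vis d with _ | ⟨y, ys⟩
        · rw [hcand] at hmc; simp at hmc
        · have hmB : pvListMin y ys = pvListMin x xs := by
            have h1 : pvListMin y ys ∈ pvCands N vis d := by
              rw [hcand]; exact pvListMin_mem y ys
            have h1' := h1
            rw [pvCands_mem] at h1'
            have hnS2 : ((pvListMin y ys).2.1, (pvListMin y ys).2.2) ∉ S := by
              intro hs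
              have hvv := hVis (pvListMin y ys).2.1 (pvListMin y ys).2.2
              rw [h1'.2.2.2.2.1] at hvv
              simp [hs] at hvv
            have hinpq : pvListMin y ys ∈ x :: xs :=
              hInv.2.1 _ _ _ hnS2 h1'.2.2.2.2.2
            have h2 : pvLexLt (pvListMin x xs) (pvListMin y ys) = false := by
              apply pvListMin_min y ys
              rw [hcand] at hmc
              exact hmc
            exact pvLexLt_antisymm (hmin _ hinpq) h2
          by_cases hNe : (pvListMin x xs).2.1 = N
          · rw [pvLoopA_cons, if_pos hNe, pvLoopB_cons N track fb vis d y ys hcand, hmB,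
              if_pos hNe]
          · rw [pvLoopA_cons, if_neg hNe, if_neg (by rw [hdm]; simp [pvStale]),
              pvLoopB_cons N track fb vis d y ys hcand, hmB, if_neg hNe]
            have hIT := pvSettle_inv hInv hS hNe
            have hcle : (pvListMin x xs).2.1 ≤ N - 1 := by
              obtain ⟨ha, hbb, hcc, hdd⟩ := hr
              omega
            obtain ⟨hI', hlen', hfst⟩ :=
              pvRelaxA_inv (track := track) hIT hr.1 hcle hr.2.2.1 hr.2.2.2
                (hTr _ hr.1 hcle)
            rw [← hfst]
            have hscard := pvS_card hI'.2.2.2.2.1 hI'.2.2.2.2.2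
            apply ih _ _ (((pvListMin x xs).2.1, (pvListMin x xs).2.2) :: S) _ fb
              (pvInv_weaken hI') ?_ ?_ ?_
            · intro c b
              by_cases hp : c = (pvListMin x xs).2.1 ∧ b = (pvListMin x xs).2.2
              · have hcb : (c, b) = ((pvListMin x xs).2.1, (pvListMin x xs).2.2) := by
                  rw [hp.1, hp.2]
                rw [if_pos hp]
                simp [List.mem_cons, hcb]
              · rw [if_neg hp, hVis c b]
                have hne2 : (c, b) ≠ ((pvListMin x xs).2.1, (pvListMin x xs).2.2) := by
                  intro hcon
                  exact hp ⟨congrArg Prod.fst hcon, congrArg Prod.snd hcon⟩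
                simp [List.mem_cons, hne2]
            · have hlen0 := List.length_erase_of_mem hmem
              have hx : (x :: xs).length = xs.length + 1 := rfl
              have hs1 : (((pvListMin x xs).2.1, (pvListMin x xs).2.2) :: S).length
                  = S.length + 1 := rfl
              rw [hlen0, hx] at hlen'
              rw [hs1] at hscard ⊢
              omega
            · have hs1 : (((pvListMin x xs).2.1, (pvListMin x xs).2.2) :: S).length
                  = S.length + 1 := rfl
              rw [hs1] at hscard ⊢
              omega

-- ===== VERDICT (by name: the statement is the Claim_ definition above) =====
theorem min_time_to_finish_spec : Claim_equal_min_time_to_finish := by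
  unfold Claim_equal_min_time_to_finish
  intro N track _ hPre
  obtain ⟨hN, hLen, hTrFin⟩ := hPre
  unfold Spec_min_time_to_finish
  have hTr : ∀ c : Int, 1 ≤ c → c ≤ N - 1 →
      ((pvTrackAt track c).1 = "J" →
          1 ≤ (pvTrackAt track c).2 ∧ (pvTrackAt track c).2 ≤ N) ∧
      ((pvTrackAt track c).1 = "S" →
          0 ≤ (pvTrackAt track c).2 ∧ (pvTrackAt track c).2 ≤ N) := by
    intro c h1 h2
    have hN2 : 2 ≤ N := by omega
    have hlen : N ≤ (track.length : Int) := hLen hN2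
    have hclen : c.toNat < track.length := by omega
    have hget : pvTrackAt track c = track[c.toNat] := by
      unfold pvTrackAt
      rw [PySem.List.pyGet?_of_nonneg (xs := track) (i := c) (by omega), List.getElem?_eq_getElem hclen]
      rfl
    have hfin := hTrFin ⟨c.toNat, hclen⟩ (by simp; omega) (by simp; omega)
    rw [hget]
    exact hfin
  have hInv0 : pvInv N (pvUpd (fun _ _ => none) 1 0 0) [(0, 1, 0)] [] none := by
    refine ⟨?_, ?_, ?_, ?_, List.nodup_nil, ?_⟩
    · intro e he
      rw [List.mem_singleton] at he
      subst he
      have hir : pvInRange N 1 0 := ⟨le_refl 1, hN, le_refl 0, by omega⟩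
      exact ⟨hir, 0, by simp [pvUpd], le_refl 0⟩
    · intro c b v hnS hd
      simp only [pvUpd] at hd
      by_cases hp : c = 1 ∧ b = 0
      · rw [if_pos hp] at hd
        have hv := Option.some_inj.1 hd
        rw [hp.1, hp.2, ← hv]
        simp
      · rw [if_neg hp] at hd
        simp at hd
    · intro p hp
      simp at hp
    · intro c b
      rw [List.countP_cons, List.countP_nil]
      split <;> omega
    · intro p hp
      simp at hp
  unfold min_time_to_finish min_time_to_finish_alt
  apply pvSim N track hN hTr _ _ _ [] _ _ hInv0
  · intro c b
    simp
  · simp only [List.length_cons, List.length_nil]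
    omega
  · simp only [List.length_nil]
    omega
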